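-- pv_equiv track=rewrite | github.com/hwkxhh/refine-x | refine-x/backend/app/services/org_product_rules.py | extract_seniority
-- ===== SOURCE A (Python) =====
-- from typing import Any, Dict, List, Optional, Tuple, Set
--
-- SENIORITY_LEVELS = {
--     "chief": 10,
--     "head of": 9,
--     "director": 8,
--     "vice president": 7,
--     "vp": 7,
--     "senior": 6,
--     "sr": 6,
--     "lead": 5,
--     "principal": 5,
--     "staff": 4,
--     "associate": 2,
--     "junior": 1,
--     "jr": 1,
--     "assistant": 1,
--     "trainee": 0,
--     "intern": 0,
-- }
--
-- def extract_seniority(value: str) -> Optional[Tuple[str, int]]: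
--     """Extract seniority level from job title.
--
--     Args:
--         value: Job title
--
--     Returns:
--         Tuple of (seniority_keyword, level) or None
--     """
--     if not value:
--         return None
--
--     val_lower = value.lower()
--
--     for keyword, level in sorted(SENIORITY_LEVELS.items(), key=lambda x: -len(x[0])):
--         if keyword in val_lower:
--             return keyword.title(), level
--
--     return None
-- ===== SOURCE B (Python) =====
-- SENIORITY_LEVELS = {
--     "chief": 10,
--     "head of": 9,
--     "director": 8,
--     "vice president": 7,
--     "vp": 7,
--     "senior": 6,
--     "sr": 6,
--     "lead": 5,
--     "principal": 5,
--     "staff": 4,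
--     "associate": 2,
--     "junior": 1,
--     "jr": 1,
--     "assistant": 1,
--     "trainee": 0,
--     "intern": 0,
-- }
--
-- def extract_seniority(value):
--     """Extract seniority level from job title (single-pass argmax, no sort)."""
--     if not value:
--         return None
--     val_lower = value.lower()
--     best = None
--     for keyword, level in SENIORITY_LEVELS.items():
--         if keyword in val_lower and (best is None or len(keyword) > len(best[0])):
--             best = (keyword, level)
--     if best is None:
--         return None
--     return best[0].title(), best[1]
-- ===== Notes on version B (the rewrite author's own statement) =====
-- stated objective: simpler
-- what changed: Replaces the per-call sort of SENIORITY_LEVELS by descending keyword length plus early-return loop with a single insertion-order pass keeping the longest matching keyword (strict > preserves the first-maximum tie-break).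
import Mathlib
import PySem

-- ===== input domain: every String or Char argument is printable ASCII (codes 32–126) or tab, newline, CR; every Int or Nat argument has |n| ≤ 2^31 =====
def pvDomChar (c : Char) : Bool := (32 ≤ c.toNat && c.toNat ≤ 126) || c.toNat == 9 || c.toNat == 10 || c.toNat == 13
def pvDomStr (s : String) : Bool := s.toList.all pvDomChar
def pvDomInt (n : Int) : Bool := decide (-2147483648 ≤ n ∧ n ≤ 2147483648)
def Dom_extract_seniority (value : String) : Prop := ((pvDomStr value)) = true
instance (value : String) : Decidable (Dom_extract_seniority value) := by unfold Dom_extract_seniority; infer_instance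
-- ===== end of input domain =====

-- B replaces A's per-call length-sort + early-return loop by one insertion-order pass keeping the
-- longest matching keyword (strict > keeps the first maximum, matching the stable sort's tie-break);
-- objective: simpler.

-- ===== PORT A =====
-- str.title(), ported step for step (exact on the ASCII domain: Python's 'cased' = alpha there)
def pyTitleGo (prevAlpha : Bool) : List Char → List Char
  | [] => []
  | c :: rest =>
    if PySem.Chars.isalpha c then
      (if prevAlpha then PySem.Chars.lowerChar c else PySem.Chars.upperChar c) :: pyTitleGo true rest
    else
      c :: pyTitleGo false rest

def pyTitle (s : String) : String := String.ofList (pyTitleGo false s.toList)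

-- SENIORITY_LEVELS as an insertion-order association list
def seniorityLevels : List (String × Int) :=
  [("chief", 10), ("head of", 9), ("director", 8), ("vice president", 7), ("vp", 7),
   ("senior", 6), ("sr", 6), ("lead", 5), ("principal", 5), ("staff", 4),
   ("associate", 2), ("junior", 1), ("jr", 1), ("assistant", 1), ("trainee", 0), ("intern", 0)]

-- the 'for keyword, level in …: if keyword in val_lower: return keyword.title(), level' loop
def esLoopA (valLower : String) : List (String × Int) → Option (String × Int)
  | [] => none
  | (kw, lvl) :: rest =>
    if PySem.Str.isIn kw valLower then some (pyTitle kw, lvl) else esLoopA valLower rest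

def extract_seniority (value : String) : Option (String × Int) :=
  if value = "" then none
  else esLoopA (PySem.Str.lower value)
    (PySem.List.sorted seniorityLevels (fun x => -(PySem.Str.len x.1)) false)

-- ===== PORT B =====
-- loop body of B: keep the longest matching keyword seen so far (strict > : first maximum wins)
def esStepB (valLower : String) (best : Option (String × Int)) (p : String × Int) :
    Option (String × Int) :=
  if PySem.Str.isIn p.1 valLower &&
      (match best with
       | none => true
       | some b => decide (PySem.Str.len b.1 < PySem.Str.len p.1)) then some p else best

def extract_seniority_alt (value : String) : Option (String × Int) :=
  if value = "" then none
  else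
    match seniorityLevels.foldl (esStepB (PySem.Str.lower value)) none with
    | none => none
    | some b => some (pyTitle b.1, b.2)

-- ===== PRECONDITION & SPEC =====
def Spec_extract_seniority (value : String) (out : Option (String × Int)) : Prop := out = extract_seniority_alt value
instance (value : String) (out : Option (String × Int)) : Decidable (Spec_extract_seniority value out) := by unfold Spec_extract_seniority; infer_instance

-- ===== CLAIM (what is proved, stated in full; the proofs are below) =====
def Claim_equal_extract_seniority : Prop := ∀ (value : String), Dom_extract_seniority value → Spec_extract_seniority value (extract_seniority value)

-- ===== LEMMAS AND PROOFS =====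

-- descending-length sort key used by A
def esKey (p : String × Int) : Int := -(PySem.Str.len p.1)

-- first matching entry of a list (A's loop, before the .title() projection)
def firstMatch (P : String × Int → Bool) : List (String × Int) → Option (String × Int)
  | [] => none
  | p :: rest => if P p then some p else firstMatch P rest

-- B's step, abstracted over the match predicate
def stepP (P : String × Int → Bool) (best : Option (String × Int)) (p : String × Int) :
    Option (String × Int) :=
  if P p &&
      (match best with
       | none => true
       | some b => decide (PySem.Str.len b.1 < PySem.Str.len p.1)) then some p else best

theorem esStepB_eq (L : String) : esStepB L = stepP (fun p => PySem.Str.isIn p.1 L) := rfl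

theorem esLoopA_eq (L : String) (xs : List (String × Int)) :
    esLoopA L xs =
      (firstMatch (fun p => PySem.Str.isIn p.1 L) xs).map (fun p => (pyTitle p.1, p.2)) := by
  induction xs with
  | nil => rfl
  | cons p rest ih =>
    obtain ⟨kw, lvl⟩ := p
    simp only [esLoopA, firstMatch, ih]
    split <;> rfl

theorem firstMatch_mem {P : String × Int → Bool} {s : List (String × Int)} {y : String × Int}
    (h : firstMatch P s = some y) : y ∈ s := by
  induction s with
  | nil => simp [firstMatch] at h
  | cons p rest ih =>
    simp only [firstMatch] at h
    by_cases hp : P p = true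
    · simp [hp] at h; simp [h]
    · simp [hp] at h; exact List.mem_cons_of_mem _ (ih h)

-- inserting one element stably (after all elements of equal or longer keyword) commutes
-- with taking the first match, as one more B-step
theorem firstMatch_insertBy (P : String × Int → Bool) (x : String × Int) :
    ∀ (s : List (String × Int)), s.Pairwise (fun a b => esKey a ≤ esKey b) →
      firstMatch P (PySem.List.insertBy (fun a b => decide (esKey a < esKey b)) x s) =
        stepP P (firstMatch P s) x := by
  intro s
  induction s with
  | nil =>
    intro _
    simp only [PySem.List.insertBy, firstMatch, stepP]
    by_cases hP : P x = true <;> simp [hP]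
  | cons b t ih =>
    intro hpw
    have hpw' := (List.pairwise_cons.mp hpw).2
    have hhead := (List.pairwise_cons.mp hpw).1
    simp only [PySem.List.insertBy]
    by_cases hlt : esKey x < esKey b
    · -- x strictly shorter key (longer keyword): goes in front
      rw [if_pos (by simpa using hlt)]
      have h1 : firstMatch P (x :: b :: t) =
          if P x = true then some x else firstMatch P (b :: t) := rfl
      rw [h1]
      by_cases hP : P x = true
      · rw [if_pos hP]
        -- every candidate from b :: t has a longer-or-equal key, i.e. a strictly shorter keyword
        cases hfm : firstMatch P (b :: t) with
        | none => simp [stepP, hP]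
        | some y =>
          have hy : y ∈ b :: t := firstMatch_mem hfm
          have hky : esKey b ≤ esKey y := by
            rcases List.mem_cons.mp hy with rfl | hy'
            · exact le_refl _
            · exact hhead y hy'
          have hlen : PySem.Str.len y.1 < PySem.Str.len x.1 := by
            simp only [esKey] at hlt hky; omega
          simp only [stepP, hP, Bool.true_and]
          rw [decide_eq_true hlen, if_pos rfl]
      · rw [if_neg hP]
        simp only [Bool.not_eq_true] at hP
        simp [stepP, hP]
    · -- x has an equal-or-greater key (equal or shorter keyword): goes after b
      rw [if_neg (by simpa using hlt)]
      have h1 : firstMatch P (b :: PySem.List.insertBy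
          (fun a b => decide (esKey a < esKey b)) x t) =
          if P b = true then some b
          else firstMatch P (PySem.List.insertBy (fun a b => decide (esKey a < esKey b)) x t) :=
        rfl
      have h2 : firstMatch P (b :: t) =
          if P b = true then some b else firstMatch P t := rfl
      rw [h1, h2, ih hpw']
      by_cases hPb : P b = true
      · -- b is kept on the A side; on the B side x cannot displace b (its keyword is not longer)
        rw [if_pos hPb, if_pos hPb]
        have hnlen : ¬ PySem.Str.len b.1 < PySem.Str.len x.1 := by
          simp only [esKey] at hlt; omega
        have hnlen' : ¬ b.1.length < x.1.length := by simpa using hnlen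
        simp [stepP, hnlen']
      · rw [if_neg hPb, if_neg hPb]

-- first match of the stable descending-length sort = B's left fold over the original order
theorem firstMatch_sorted_eq_foldl (P : String × Int → Bool) (l : List (String × Int)) :
    firstMatch P (PySem.List.sorted l esKey false) = l.foldl (stepP P) none := by
  induction l using List.reverseRecOn with
  | nil => rfl
  | append_singleton l' x ih =>
    have hsorted : PySem.List.sorted (l' ++ [x]) esKey false =
        PySem.List.insertBy (fun a b => decide (esKey a < esKey b)) x
          (PySem.List.sorted l' esKey false) := by
      rw [PySem.List.sorted_eq_foldl_insertBy, PySem.List.sorted_eq_foldl_insertBy,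
        List.foldl_append]
      rfl
    rw [hsorted, List.foldl_append,
      firstMatch_insertBy P x _ (PySem.List.sorted_pairwise l' esKey), ih]
    rfl

-- ===== VERDICT (by name: the statement is the Claim_ definition above) =====
theorem extract_seniority_spec : Claim_equal_extract_seniority := by
  intro value _
  unfold Spec_extract_seniority
  by_cases hv : value = ""
  · simp [extract_seniority, extract_seniority_alt, hv]
  · simp only [extract_seniority, extract_seniority_alt, if_neg hv]
    rw [esLoopA_eq, esStepB_eq,
      show (fun x : String × Int => -(PySem.Str.len x.1)) = esKey from rfl,
      firstMatch_sorted_eq_foldl]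
    cases seniorityLevels.foldl (stepP fun p => PySem.Str.isIn p.1 (PySem.Str.lower value)) none with
    | none => rfl
    | some b => rfl
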